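-- pv_equiv track=rewrite | github.com/phoenixak/RAG-System | src/auth/security.py | _has_sequential_chars
-- ===== SOURCE A (Python) =====
-- def _has_sequential_chars(password: str, min_length: int = 3) -> bool:
--     """Check for sequential characters in password."""
--     sequences = [
--         "abcdefghijklmnopqrstuvwxyz",
--         "0123456789",
--         "qwertyuiop",
--         "asdfghjkl",
--         "zxcvbnm",
--     ]
--
--     password_lower = password.lower()
--
--     for seq in sequences:
--         for i in range(len(seq) - min_length + 1):
--             substring = seq[i : i + min_length]
--             if substring in password_lower or substring[::-1] in password_lower:
--                 return True
--
--     return False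
-- ===== SOURCE B (Python) =====
-- def _has_sequential_chars(password: str, min_length: int = 3) -> bool:
--     """Check for sequential characters in password."""
--     sequences = [
--         "abcdefghijklmnopqrstuvwxyz",
--         "0123456789",
--         "qwertyuiop",
--         "asdfghjkl",
--         "zxcvbnm",
--     ]
--
--     if min_length <= 0:
--         return True  # the empty window occurs in every password
--
--     windows = set()
--     for seq in sequences:
--         for i in range(len(seq) - min_length + 1):
--             w = seq[i : i + min_length]
--             windows.add(w)
--             windows.add(w[::-1])
--
--     password_lower = password.lower()
--     return any(
--         password_lower[i : i + min_length] in windows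
--         for i in range(len(password_lower) - min_length + 1)
--     )
-- ===== Notes on version B (the rewrite author's own statement) =====
-- stated objective: alternative
-- what changed: Instead of scanning the password repeatedly for every window of the five fixed sequences (and its reverse), B precomputes a set of all forward and reversed sequence windows once, returns True up front for min_length <= 0 (the empty window occurs everywhere), and otherwise slides a single window over password.lower(), testing set membership.
import Mathlib
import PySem

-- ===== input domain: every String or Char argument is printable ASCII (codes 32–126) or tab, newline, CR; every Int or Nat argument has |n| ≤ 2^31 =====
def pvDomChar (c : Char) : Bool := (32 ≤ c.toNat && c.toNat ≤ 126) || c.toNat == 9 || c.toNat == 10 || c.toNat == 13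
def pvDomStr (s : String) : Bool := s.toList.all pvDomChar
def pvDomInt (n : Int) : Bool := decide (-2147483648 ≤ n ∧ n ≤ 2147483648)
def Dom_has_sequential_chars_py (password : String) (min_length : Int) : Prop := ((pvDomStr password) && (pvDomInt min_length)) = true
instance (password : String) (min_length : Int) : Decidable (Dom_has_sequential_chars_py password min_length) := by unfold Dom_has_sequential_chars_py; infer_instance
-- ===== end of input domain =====

-- B replaces A's per-sequence-window substring scans of the password by a precomputed set of all
-- forward/reversed sequence windows plus one sliding-window pass over password.lower() (alternative algorithm, similar cost).

-- ===== PORT A =====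
-- the five fixed sequences (same list in both Pythons)
def pvSeqs : List String :=
  ["abcdefghijklmnopqrstuvwxyz", "0123456789", "qwertyuiop", "asdfghjkl", "zxcvbnm"]

-- s[::-1]  (always `some`, so getD never uses its default)
def pvRevStr (s : String) : String := (PySem.Str.slice? s none none (-1)).getD ""

-- 'for i in range(stop): if f(i): return True' — Python's range is lazy and the loop
-- returns at the first hit, so the loop is ported as a short-circuiting recursion
def pvForAny (f : Int → Bool) (i stop : Int) : Bool :=
  if i < stop then
    if f i then true else pvForAny f (i + 1) stop
  else false
termination_by (stop - i).toNat
decreasing_by omega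

def has_sequential_chars_py (password : String) (min_length : Int) : Bool :=
  let password_lower := PySem.Str.lower password
  pvSeqs.any (fun seq =>
    pvForAny (fun i =>
      let substring := PySem.Str.slice seq (some i) (some (i + min_length))
      PySem.Str.isIn substring password_lower || PySem.Str.isIn (pvRevStr substring) password_lower)
      0 (PySem.Str.len seq - min_length + 1))

-- ===== PORT B =====
def has_sequential_chars_py_alt (password : String) (min_length : Int) : Bool :=
  if min_length ≤ 0 then true  -- the empty window occurs in every password
  else
  let windows : PySem.Set String :=
    pvSeqs.foldl (fun ws seq =>
      (PySem.List.pyRange 0 (PySem.Str.len seq - min_length + 1) 1).foldl (fun ws2 i =>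
        let w := PySem.Str.slice seq (some i) (some (i + min_length))
        PySem.Set.add (PySem.Set.add ws2 w) (pvRevStr w)) ws) PySem.Set.empty
  let password_lower := PySem.Str.lower password
  (PySem.List.pyRange 0 (PySem.Str.len password_lower - min_length + 1) 1).any (fun i =>
    PySem.Set.contains windows (PySem.Str.slice password_lower (some i) (some (i + min_length))))

-- ===== PRECONDITION & SPEC =====
def Spec_has_sequential_chars_py (password : String) (min_length : Int) (out : Bool) : Prop := out = has_sequential_chars_py_alt password min_length
instance (password : String) (min_length : Int) (out : Bool) : Decidable (Spec_has_sequential_chars_py password min_length out) := by unfold Spec_has_sequential_chars_py; infer_instance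

-- ===== CLAIM (what is proved, stated in full; the proofs are below) =====
def Claim_equal_has_sequential_chars_py : Prop := ∀ (password : String) (min_length : Int), Dom_has_sequential_chars_py password min_length → Spec_has_sequential_chars_py password min_length (has_sequential_chars_py password min_length)

-- ===== LEMMAS AND PROOFS =====

lemma revStr_toList (s : String) : (pvRevStr s).toList = s.toList.reverse := by
  simp [pvRevStr, PySem.Str.slice?_none_none_neg_one]

lemma pvForAny_iff (f : Int → Bool) (i stop : Int) :
    pvForAny f i stop = true ↔ ∃ j : Int, i ≤ j ∧ j < stop ∧ f j = true := by
  fun_induction pvForAny f i stop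
  case case1 h hf => simp only [true_iff]; exact ⟨_, le_refl _, h, hf⟩
  case case2 h hf ih =>
    rw [ih]
    constructor
    · rintro ⟨j, hj1, hj2, hj3⟩; exact ⟨j, by omega, hj2, hj3⟩
    · rintro ⟨j, hj1, hj2, hj3⟩
      refine ⟨j, ?_, hj2, hj3⟩
      rcases eq_or_lt_of_le hj1 with rfl | hlt2
      · exact absurd hj3 hf
      · omega
  case case3 h => simp only [Bool.false_eq_true, false_iff]; rintro ⟨j, hj1, hj2, _⟩; omega

lemma any_pyRange_iff (n : Int) (f : Int → Bool) :
    ((PySem.List.pyRange 0 n 1).any f = true) ↔ ∃ i : Int, 0 ≤ i ∧ i < n ∧ f i = true := by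
  simp [List.any_eq_true, PySem.List.mem_pyRange_one, and_assoc]

lemma mem_fold_inner (l : List Int) (f g : Int → String) (s0 : PySem.Set String) (x : String) :
    (x ∈ l.foldl (fun ws i => PySem.Set.add (PySem.Set.add ws (f i)) (g i)) s0) ↔
      x ∈ s0 ∨ ∃ i ∈ l, x = f i ∨ x = g i := by
  induction l generalizing s0 with
  | nil => simp
  | cons a l ih =>
      simp only [List.foldl_cons, ih, PySem.Set.mem_add, List.mem_cons]
      constructor
      · rintro (((h | h) | h) | ⟨i, hi, hx⟩)
        · exact Or.inl h
        · exact Or.inr ⟨a, Or.inl rfl, Or.inl h⟩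
        · exact Or.inr ⟨a, Or.inl rfl, Or.inr h⟩
        · exact Or.inr ⟨i, Or.inr hi, hx⟩
      · rintro (h | ⟨i, (rfl | hi), hx⟩)
        · exact Or.inl (Or.inl (Or.inl h))
        · rcases hx with h | h
          · exact Or.inl (Or.inl (Or.inr h))
          · exact Or.inl (Or.inr h)
        · exact Or.inr ⟨i, hi, hx⟩

lemma mem_windows (ss : List String) (m : Int) (s0 : PySem.Set String) (x : String) :
    (x ∈ ss.foldl (fun ws seq =>
        (PySem.List.pyRange 0 (PySem.Str.len seq - m + 1) 1).foldl (fun ws2 i =>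
          PySem.Set.add (PySem.Set.add ws2 ((PySem.Str.slice seq (some i) (some (i + m))))) (pvRevStr ((PySem.Str.slice seq (some i) (some (i + m)))))) ws) s0) ↔
      x ∈ s0 ∨ ∃ seq ∈ ss, ∃ i : Int, (0 ≤ i ∧ i < PySem.Str.len seq - m + 1) ∧
        (x = (PySem.Str.slice seq (some i) (some (i + m))) ∨ x = pvRevStr ((PySem.Str.slice seq (some i) (some (i + m))))) := by
  induction ss generalizing s0 with
  | nil => simp
  | cons a l ih =>
      simp only [List.foldl_cons, ih, mem_fold_inner, PySem.List.mem_pyRange_one, List.mem_cons]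
      constructor
      · rintro (((h | ⟨i, hi, hx⟩) ) | ⟨seq, hs, i, hb, hx⟩)
        · exact Or.inl h
        · exact Or.inr ⟨a, Or.inl rfl, i, hi, hx⟩
        · exact Or.inr ⟨seq, Or.inr hs, i, hb, hx⟩
      · rintro (h | ⟨seq, (rfl | hs), i, hb, hx⟩)
        · exact Or.inl (Or.inl h)
        · exact Or.inl (Or.inr ⟨i, hb, hx⟩)
        · exact Or.inr ⟨seq, hs, i, hb, hx⟩

lemma len_eq_toList (s : String) : PySem.Str.len s = (s.toList.length : Int) := by
  simp [PySem.Str.len_eq]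

-- key bridge: for a window of length m>0, `t in s` iff some length-m slice of s equals t
lemma isIn_iff_window (t s : String) (m : Int) (hm : 0 < m) (ht : (t.toList.length : Int) = m) :
    PySem.Str.isIn t s = true ↔
      ∃ j : Int, 0 ≤ j ∧ j < PySem.Str.len s - m + 1 ∧
        PySem.Str.slice s (some j) (some (j + m)) = t := by
  have hmnat : ((m.toNat : Int)) = m := Int.toNat_of_nonneg hm.le
  rw [PySem.Str.isIn_iff_infix]
  constructor
  · intro h
    obtain ⟨j, hpre⟩ := (PySem.Chars.exists_prefix_drop_iff_isIn t.toList s.toList).mpr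
      ((PySem.Chars.isIn_iff_infix _ _).mpr h)
    have hlen := hpre.length_le
    rw [List.length_drop] at hlen
    refine ⟨(j : Int), by positivity, ?_, ?_⟩
    · rw [len_eq_toList]; omega
    · apply String.toList_inj.mp
      have : (j : Int) + m = (j : Int) + (m.toNat : Int) := by omega
      rw [PySem.Str.toList_slice, PySem.Chars.slice_eq_listSlice, this,
        PySem.List.slice_natCast_add]
      have hlen2 : t.toList.length = m.toNat := by omega
      rw [← hlen2]
      exact (List.prefix_iff_eq_take.mp hpre).symm
  · rintro ⟨j, hj0, hjlt, heq⟩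
    have hj : ((j.toNat : Int)) = j := Int.toNat_of_nonneg hj0
    apply (PySem.Chars.isIn_iff_infix _ _).mp
    apply (PySem.Chars.exists_prefix_drop_iff_isIn t.toList s.toList).mp
    refine ⟨j.toNat, ?_⟩
    have : PySem.Str.slice s (some j) (some (j + m)) =
        PySem.Str.slice s (some (j.toNat : Int)) (some ((j.toNat : Int) + (m.toNat : Int))) := by
      rw [hj, hmnat]
    rw [this] at heq
    have htake : (s.toList.drop j.toNat).take m.toNat = t.toList := by
      rw [← PySem.List.slice_natCast_add, ← PySem.Chars.slice_eq_listSlice,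
        ← PySem.Str.toList_slice, heq]
    rw [← htake]
    exact List.take_prefix _ _

lemma win_len (seq : String) (i m : Int) (hm : 0 < m) (h0 : 0 ≤ i)
    (hlt : i < PySem.Str.len seq - m + 1) : (((PySem.Str.slice seq (some i) (some (i + m)))).toList.length : Int) = m := by
  have hi : ((i.toNat : Int)) = i := Int.toNat_of_nonneg h0
  have hmnat : ((m.toNat : Int)) = m := Int.toNat_of_nonneg hm.le
  have : (PySem.Str.slice seq (some i) (some (i + m))) =
      PySem.Str.slice seq (some (i.toNat : Int)) (some ((i.toNat : Int) + (m.toNat : Int))) := by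
    rw [hi, hmnat]
  rw [this]
  rw [len_eq_toList] at hlt
  have : (PySem.Str.slice seq (some (i.toNat : Int))
      (some ((i.toNat : Int) + (m.toNat : Int)))).toList =
      (seq.toList.drop i.toNat).take m.toNat := by
    rw [PySem.Str.toList_slice, PySem.Chars.slice_eq_listSlice, PySem.List.slice_natCast_add]
  rw [this]
  simp [List.length_take, List.length_drop]
  have hsl : seq.toList.length = seq.length := rfl
  omega

-- s[len(s) : len(s)+m] is empty for every m
lemma slice_at_end (s : String) (m : Int) :
    (PySem.Str.slice s (some (PySem.Str.len s)) (some (PySem.Str.len s + m))).toList = [] := by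
  apply List.eq_nil_of_length_eq_zero
  rw [PySem.Str.toList_slice, PySem.Chars.slice_eq_listSlice, len_eq_toList,
    PySem.List.length_slice]
  have h1 := PySem.List.clampIdx_le s.toList.length ((s.toList.length : Int) + m)
  have h2 : PySem.List.clampIdx s.toList.length (s.toList.length : Int) = s.toList.length := by
    rw [PySem.List.clampIdx_natCast]; omega
  omega

lemma isIn_of_toList_nil (t s : String) (h : t.toList = []) : PySem.Str.isIn t s = true := by
  rw [PySem.Str.isIn_eq, h]
  exact PySem.Chars.isIn_nil _

theorem main_eq (password : String) (min_length : Int) :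
    has_sequential_chars_py password min_length = has_sequential_chars_py_alt password min_length := by
  unfold has_sequential_chars_py has_sequential_chars_py_alt
  by_cases hm : 0 < min_length
  · rw [if_neg (by omega : ¬ min_length ≤ 0)]
    rw [Bool.eq_iff_iff, List.any_eq_true, any_pyRange_iff]
    constructor
    · rintro ⟨seq, hseq, hin⟩
      rw [pvForAny_iff] at hin
      obtain ⟨i, hi0, hilt, hor⟩ := hin
      rw [Bool.or_eq_true] at hor
      have hwl := win_len seq i min_length hm hi0 hilt
      rcases hor with h | h
      · obtain ⟨j, hj0, hjlt, heq⟩ :=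
          (isIn_iff_window _ _ min_length hm hwl).mp h
        refine ⟨j, hj0, hjlt, ?_⟩
        rw [PySem.Set.contains_iff, mem_windows]
        exact Or.inr ⟨seq, hseq, i, ⟨hi0, hilt⟩, Or.inl heq⟩
      · have hrl : (((pvRevStr ((PySem.Str.slice seq (some i) (some (i + min_length))))).toList.length : Int)) = min_length := by
          rw [revStr_toList, List.length_reverse]; exact hwl
        obtain ⟨j, hj0, hjlt, heq⟩ :=
          (isIn_iff_window _ _ min_length hm hrl).mp h
        refine ⟨j, hj0, hjlt, ?_⟩
        rw [PySem.Set.contains_iff, mem_windows]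
        exact Or.inr ⟨seq, hseq, i, ⟨hi0, hilt⟩, Or.inr heq⟩
    · rintro ⟨j, hj0, hjlt, hcon⟩
      rw [PySem.Set.contains_iff, mem_windows] at hcon
      rcases hcon with h | ⟨seq, hseq, i, ⟨hi0, hilt⟩, hx⟩
      · simp [PySem.Set.empty] at h
      · refine ⟨seq, hseq, ?_⟩
        rw [pvForAny_iff]
        refine ⟨i, hi0, hilt, ?_⟩
        rw [Bool.or_eq_true]
        have hwl := win_len seq i min_length hm hi0 hilt
        rcases hx with hx | hx
        · exact Or.inl ((isIn_iff_window _ _ min_length hm hwl).mpr ⟨j, hj0, hjlt, hx⟩)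
        · have hrl : (((pvRevStr ((PySem.Str.slice seq (some i) (some (i + min_length))))).toList.length : Int)) = min_length := by
            rw [revStr_toList, List.length_reverse]; exact hwl
          exact Or.inr ((isIn_iff_window _ _ min_length hm hrl).mpr ⟨j, hj0, hjlt, hx⟩)
  · -- min_length ≤ 0: A finds an empty window, B returns true up front
    rw [not_lt] at hm
    rw [if_pos hm]
    rw [List.any_eq_true]
    have hseq0 : PySem.Str.len "abcdefghijklmnopqrstuvwxyz" = 26 := by decide
    have hwin0 : ((PySem.Str.slice "abcdefghijklmnopqrstuvwxyz" (some 26) (some (26 + min_length)))).toList = [] := by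
      have : (26 : Int) = PySem.Str.len "abcdefghijklmnopqrstuvwxyz" := by rw [hseq0]
      rw [this]
      exact slice_at_end _ _
    refine ⟨"abcdefghijklmnopqrstuvwxyz", by simp [pvSeqs], ?_⟩
    rw [pvForAny_iff]
    refine ⟨26, by norm_num, by rw [hseq0]; omega, ?_⟩
    rw [Bool.or_eq_true]
    exact Or.inl (isIn_of_toList_nil _ _ hwin0)

-- ===== VERDICT (by name: the statement is the Claim_ definition above) =====
theorem has_sequential_chars_py_spec : Claim_equal_has_sequential_chars_py := by
  intro password min_length _
  unfold Spec_has_sequential_chars_py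
  exact main_eq password min_length
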